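-- pv_equiv track=rewrite | github.com/tieukhoimai/discrete-opt | prima_PD_su_linea/feasible_solutions_pedro.py | count_feasible_solutions
-- ===== SOURCE A (Python) =====
-- def count_feasible_solutions(arr, n):
--     feasible_solutions = 0
--
--     if n == 0:
--          pass
--
--     elif n == 1 or n == 2 or n == 3:
--         feasible_solutions += n + 1
--
--     else:
--         # n = 4 --> 6 feasible solutions
--         # n = 6 --> 13 feasible solutions
--         for idx_1 in range(0, len(arr)):
--             for idx_2 in range(idx_1, len(arr), 3):
--                 if idx_2 - idx_1 >= 3:
--                     for idx_3 in range(0, (len(arr) - idx_2) + 1):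
--                         feasible_solutions += 1
--                 elif idx_2 < len(arr):
--                     feasible_solutions += 1
--         feasible_solutions += 1                     # adding the empty set
--
--
--     return feasible_solutions
-- ===== SOURCE B (Python) =====
-- def count_feasible_solutions(arr, n):
--     if n == 0:
--         return 0
--     if n in (1, 2, 3):
--         return n + 1
--     L = len(arr)
--     M, q = divmod(L, 3)
--     return L + 1 + 3 * M * (M * M - 1) // 2 + q * M * L // 2
-- ===== Notes on version B (the rewrite author's own statement) =====
-- stated objective: faster
-- what changed: B replaces A's three nested counting loops (which add 1 per innermost iteration) by a closed-form O(1) arithmetic formula in L = len(arr): L + 1 + 3*M*(M*M-1)//2 + q*M*L//2 with M, q = divmod(L, 3).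
import Mathlib
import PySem

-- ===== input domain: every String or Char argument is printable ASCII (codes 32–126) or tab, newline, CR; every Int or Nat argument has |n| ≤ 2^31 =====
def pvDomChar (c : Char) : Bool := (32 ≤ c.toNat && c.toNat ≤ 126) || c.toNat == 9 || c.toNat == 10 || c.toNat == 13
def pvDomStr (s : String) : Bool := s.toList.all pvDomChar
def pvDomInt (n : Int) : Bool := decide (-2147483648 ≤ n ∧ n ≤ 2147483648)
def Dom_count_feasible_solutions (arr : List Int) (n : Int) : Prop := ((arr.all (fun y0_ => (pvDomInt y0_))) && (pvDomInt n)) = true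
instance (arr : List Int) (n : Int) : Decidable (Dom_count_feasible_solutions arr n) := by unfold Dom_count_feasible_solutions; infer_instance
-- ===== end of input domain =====

-- B replaces A's triple nested counting loops by an O(1) closed-form summation of the same counts.

-- ===== PORT A =====
def count_feasible_solutions (arr : List Int) (n : Int) : Int :=
  let feasible0 : Int := 0
  if n = 0 then feasible0
  else if n = 1 ∨ n = 2 ∨ n = 3 then feasible0 + (n + 1)
  else
    let L : Int := arr.length
    let fs := (PySem.List.pyRange 0 L 1).foldl (fun acc idx1 =>
      (PySem.List.pyRange idx1 L 3).foldl (fun acc2 idx2 =>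
        if 3 ≤ idx2 - idx1 then
          (PySem.List.pyRange 0 (L - idx2 + 1) 1).foldl (fun a _ => a + 1) acc2
        else if idx2 < L then acc2 + 1 else acc2) acc) feasible0
    fs + 1

-- ===== PORT B =====
def count_feasible_solutions_alt (arr : List Int) (n : Int) : Int :=
  if n = 0 then 0
  else if n = 1 ∨ n = 2 ∨ n = 3 then n + 1
  else
    let L : Int := arr.length
    let M := PySem.Int.floordiv L 3
    let q := PySem.Int.mod L 3
    L + 1 + PySem.Int.floordiv (3 * M * (M * M - 1)) 2 + PySem.Int.floordiv (q * M * L) 2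

-- ===== PRECONDITION & SPEC =====
def Spec_count_feasible_solutions (arr : List Int) (n : Int) (out : Int) : Prop := out = count_feasible_solutions_alt arr n
instance (arr : List Int) (n : Int) (out : Int) : Decidable (Spec_count_feasible_solutions arr n out) := by unfold Spec_count_feasible_solutions; infer_instance

-- ===== CLAIM (what is proved, stated in full; the proofs are below) =====
def Claim_equal_count_feasible_solutions : Prop := ∀ (arr : List Int) (n : Int), Dom_count_feasible_solutions arr n → Spec_count_feasible_solutions arr n (count_feasible_solutions arr n)

-- ===== LEMMAS AND PROOFS =====

-- triangular number 1 + 2 + … + m, kept as a sum so that no division appears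
def pvTri (m : Nat) : Int := ((List.range m).map (fun k : Nat => (k : Int) + 1)).sum

-- contribution of A's middle loop beyond its first iteration, for reflected index r = L-1-idx1
def pvD (r : Nat) : Int := ((r / 3 : Nat) : Int) * ((r : Int) + 2) - 3 * pvTri (r / 3)

def pvS (L : Nat) : Int := ((List.range L).map pvD).sum

lemma pvRangeSum_succ (f : Nat → Int) (n : Nat) :
    ((List.range (n + 1)).map f).sum = ((List.range n).map f).sum + f n := by
  rw [List.range_succ]; simp

lemma pvTri_succ (m : Nat) : pvTri (m + 1) = pvTri m + ((m : Int) + 1) := by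
  unfold pvTri; exact pvRangeSum_succ _ m

lemma pvTri_two (m : Nat) : 2 * pvTri m = (m : Int) * ((m : Int) + 1) := by
  induction m with
  | zero => simp [pvTri]
  | succ m ih =>
    rw [pvTri_succ]
    push_cast
    linear_combination ih

lemma pvSum_lin (m : Nat) (c : Int) :
    ((List.range m).map (fun k : Nat => c - 3 * ((k : Int) + 1))).sum = (m : Int) * c - 3 * pvTri m := by
  induction m with
  | zero => simp [pvTri]
  | succ m ih =>
    rw [pvRangeSum_succ, ih, pvTri_succ]
    push_cast
    ring

lemma pvS_succ (L : Nat) : pvS (L + 1) = pvS L + pvD L := by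
  unfold pvS
  rw [List.range_succ, List.map_append, List.sum_append]
  simp

lemma pvS_two (L : Nat) :
    2 * pvS L = 3 * ((L / 3 : Nat) : Int) * (((L / 3 : Nat) : Int) * ((L / 3 : Nat) : Int) - 1)
      + ((L % 3 : Nat) : Int) * ((L / 3 : Nat) : Int) * (L : Int) := by
  induction L with
  | zero => simp [pvS]
  | succ L ih =>
    rw [pvS_succ]
    have hm2 : 2 * pvD L = 2 * ((L / 3 : Nat) : Int) * ((L : Int) + 2)
        - 3 * ((L / 3 : Nat) : Int) * (((L / 3 : Nat) : Int) + 1) := by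
      unfold pvD; linear_combination (-3 : Int) * pvTri_two (L / 3)
    have h3 : L % 3 = 0 ∨ L % 3 = 1 ∨ L % 3 = 2 := by omega
    have e3 : (L : Int) = 3 * ((L / 3 : Nat) : Int) + ((L % 3 : Nat) : Int) := by omega
    rcases h3 with h | h | h
    · have e1 : (L + 1) / 3 = L / 3 := by omega
      have e2 : (L + 1) % 3 = 1 := by omega
      rw [e1, e2]
      rw [h] at ih e3
      simp only [Nat.cast_add, Nat.cast_one, Nat.cast_zero] at ih e3 ⊢
      linear_combination ih + hm2 + ((L / 3 : Nat) : Int) * e3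
    · have e1 : (L + 1) / 3 = L / 3 := by omega
      have e2 : (L + 1) % 3 = 2 := by omega
      rw [e1, e2]
      rw [h] at ih e3
      simp only [Nat.cast_add, Nat.cast_one, Nat.cast_ofNat] at ih e3 ⊢
      linear_combination ih + hm2 + ((L / 3 : Nat) : Int) * e3
    · have e1 : (L + 1) / 3 = L / 3 + 1 := by omega
      have e2 : (L + 1) % 3 = 0 := by omega
      rw [e1, e2]
      rw [h] at ih e3
      simp only [Nat.cast_add, Nat.cast_one, Nat.cast_zero, Nat.cast_ofNat] at ih e3 ⊢
      linear_combination ih + hm2 + (4 * ((L / 3 : Nat) : Int)) * e3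

-- list-sum over range of a reflected function
lemma pvSum_reflect (f : Nat → Int) (n : Nat) :
    ((List.range n).map (fun i => f (n - 1 - i))).sum = ((List.range n).map f).sum := by
  have h1 : ((List.range n).map (fun i => f (n - 1 - i))).sum = ∑ i ∈ Finset.range n, f (n - 1 - i) := rfl
  have h2 : ((List.range n).map f).sum = ∑ i ∈ Finset.range n, f i := rfl
  rw [h1, h2]
  exact Finset.sum_range_reflect f n

-- one step of A's middle loop, at idx2 = i + 3k
lemma pvStep (Ln i k : Nat) (hk : i + 3 * k < Ln) (acc2 : Int) :
    (if 3 ≤ ((i : Int) + 3 * (k : Int)) - (i : Int) then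
        (PySem.List.pyRange 0 ((Ln : Int) - ((i : Int) + 3 * (k : Int)) + 1) 1).foldl
          (fun a _ => a + 1) acc2
      else if (i : Int) + 3 * (k : Int) < (Ln : Int) then acc2 + 1 else acc2)
    = acc2 + (if 1 ≤ k then ((Ln : Int) - (i : Int) + 1 - 3 * (k : Int)) else 1) := by
  by_cases h1 : 1 ≤ k
  · rw [if_pos (by omega), if_pos h1]
    rw [PySem.List.foldl_add _ (fun _ => (1 : Int)), PySem.List.sum_map_const_int,
        PySem.List.length_pyRange_one]
    rw [Int.toNat_of_nonneg (by omega)]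
    ring
  · have hk0 : k = 0 := by omega
    subst hk0
    simp
    omega

-- the sum A's middle loop accumulates for a fixed idx1 = i
lemma pvInnerSum (Ln i : Nat) (hi : i < Ln) :
    ((List.range ((Ln - i + 2) / 3)).map
        (fun k : Nat => if 1 ≤ k then ((Ln : Int) - (i : Int) + 1 - 3 * (k : Int)) else 1)).sum
    = 1 + pvD (Ln - 1 - i) := by
  have hK : (Ln - i + 2) / 3 = (Ln - 1 - i) / 3 + 1 := by omega
  rw [hK, List.range_succ_eq_map]
  simp only [List.map_cons, List.sum_cons, List.map_map]
  norm_num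
  rw [List.map_congr_left (f := (fun k : Nat => if 1 ≤ k then ((Ln : Int) - (i : Int) + 1 - 3 * (k : Int)) else 1) ∘ Nat.succ)
      (g := fun k : Nat => ((Ln : Int) - (i : Int) + 1) - 3 * ((k : Int) + 1))
      (fun k _ => by simp [Function.comp])]
  rw [pvSum_lin]
  unfold pvD
  have hc : ((Ln - 1 - i : Nat) : Int) = (Ln : Int) - 1 - (i : Int) := by omega
  rw [hc]
  ring

-- A's middle loop for a fixed idx1 = i
lemma pvInner (Ln i : Nat) (hi : i < Ln) (acc : Int) :
    (PySem.List.pyRange (i : Int) (Ln : Int) 3).foldl (fun acc2 idx2 =>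
        if 3 ≤ idx2 - (i : Int) then
          (PySem.List.pyRange 0 ((Ln : Int) - idx2 + 1) 1).foldl (fun a _ => a + 1) acc2
        else if idx2 < (Ln : Int) then acc2 + 1 else acc2) acc
    = acc + (1 + pvD (Ln - 1 - i)) := by
  rw [PySem.List.pyRange_of_pos _ _ (by norm_num : (0 : Int) < 3)]
  rw [if_pos (by exact_mod_cast hi)]
  have hcnt : (((Ln : Int) - (i : Int) + 3 - 1) / 3).toNat = (Ln - i + 2) / 3 := by omega
  rw [hcnt, List.foldl_map]
  have h1 := PySem.List.foldl_congr_mem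
      (l := List.range ((Ln - i + 2) / 3)) (init := acc)
      (f := fun (acc2 : Int) (k : Nat) =>
        if 3 ≤ (i : Int) + 3 * (k : Int) - (i : Int) then
          List.foldl (fun a _ => a + 1) acc2
            (PySem.List.pyRange 0 ((Ln : Int) - ((i : Int) + 3 * (k : Int)) + 1) 1)
        else if (i : Int) + 3 * (k : Int) < (Ln : Int) then acc2 + 1 else acc2)
      (g := fun (acc2 : Int) (k : Nat) =>
        acc2 + (if 1 ≤ k then ((Ln : Int) - (i : Int) + 1 - 3 * (k : Int)) else 1))
      (fun acc2 k hmem => pvStep Ln i k (by have := List.mem_range.mp hmem; omega) acc2)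
  rw [h1]
  rw [PySem.List.foldl_add]
  rw [pvInnerSum Ln i hi]

-- A's else-branch loop equals L + pvS L
lemma pvA_loop (Ln : Nat) :
    (PySem.List.pyRange 0 (Ln : Int) 1).foldl (fun acc idx1 =>
      (PySem.List.pyRange idx1 (Ln : Int) 3).foldl (fun acc2 idx2 =>
        if 3 ≤ idx2 - idx1 then
          (PySem.List.pyRange 0 ((Ln : Int) - idx2 + 1) 1).foldl (fun a _ => a + 1) acc2
        else if idx2 < (Ln : Int) then acc2 + 1 else acc2) acc) 0
    = (Ln : Int) + pvS Ln := by
  rw [PySem.List.pyRange_zero_natCast, List.foldl_map]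
  have h1 := PySem.List.foldl_congr_mem
      (l := List.range Ln) (init := (0 : Int))
      (f := fun (acc : Int) (i : Nat) =>
        (PySem.List.pyRange (i : Int) (Ln : Int) 3).foldl (fun acc2 idx2 =>
          if 3 ≤ idx2 - (i : Int) then
            (PySem.List.pyRange 0 ((Ln : Int) - idx2 + 1) 1).foldl (fun a _ => a + 1) acc2
          else if idx2 < (Ln : Int) then acc2 + 1 else acc2) acc)
      (g := fun (acc : Int) (i : Nat) => acc + (1 + pvD (Ln - 1 - i)))
      (fun acc i hmem => pvInner Ln i (List.mem_range.mp hmem) acc)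
  rw [h1]
  rw [PySem.List.foldl_add]
  rw [PySem.List.sum_map_add_int (f := fun _ : Nat => (1 : Int)) (g := fun i : Nat => pvD (Ln - 1 - i))]
  rw [PySem.List.sum_map_const_int, pvSum_reflect pvD Ln]
  unfold pvS
  simp

lemma pvFdiv_two (x : Int) : PySem.Int.floordiv (2 * x) 2 = x := by
  rw [PySem.Int.floordiv_eq_ediv_of_pos (by norm_num)]
  omega

-- B's else-branch value equals L + 1 + pvS L
lemma pvB_val (Ln : Nat) :
    (Ln : Int) + 1 + PySem.Int.floordiv (3 * PySem.Int.floordiv (Ln : Int) 3 *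
        (PySem.Int.floordiv (Ln : Int) 3 * PySem.Int.floordiv (Ln : Int) 3 - 1)) 2
      + PySem.Int.floordiv (PySem.Int.mod (Ln : Int) 3 * PySem.Int.floordiv (Ln : Int) 3 * (Ln : Int)) 2
    = (Ln : Int) + 1 + pvS Ln := by
  have hM : PySem.Int.floordiv (Ln : Int) 3 = ((Ln / 3 : Nat) : Int) := by
    exact_mod_cast PySem.Int.floordiv_natCast Ln 3
  have hq : PySem.Int.mod (Ln : Int) 3 = ((Ln % 3 : Nat) : Int) := by
    exact_mod_cast PySem.Int.mod_natCast Ln 3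
  rw [hM, hq]
  -- evenness of both numerators
  obtain ⟨t, ht⟩ : Even ((((Ln / 3 : Nat) : Int) - 1) * ((Ln / 3 : Nat) : Int)) := by
    have := Int.even_mul_succ_self (((Ln / 3 : Nat) : Int) - 1)
    simpa using this
  have hA : 3 * ((Ln / 3 : Nat) : Int) * (((Ln / 3 : Nat) : Int) * ((Ln / 3 : Nat) : Int) - 1)
      = 2 * (3 * (((Ln / 3 : Nat) : Int) + 1) * t) := by
    linear_combination (3 * (((Ln / 3 : Nat) : Int) + 1)) * ht
  obtain ⟨y, hy⟩ : 2 ∣ (Ln % 3) * (Ln / 3) * Ln := by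
    rcases Nat.even_or_odd Ln with hE | hO
    · exact Dvd.dvd.mul_left hE.two_dvd _
    · have hO2 : Ln % 2 = 1 := Nat.odd_iff.mp hO
      have h3 : Ln % 3 = 0 ∨ Ln % 3 = 1 ∨ Ln % 3 = 2 := by omega
      rcases h3 with h | h | h
      · simp [h]
      · have : 2 ∣ Ln / 3 := by omega
        exact Dvd.dvd.mul_right (Dvd.dvd.mul_left this _) _
      · rw [h]
        exact Dvd.dvd.mul_right (Dvd.dvd.mul_right (by norm_num) _) _
  have hB : ((Ln % 3 : Nat) : Int) * ((Ln / 3 : Nat) : Int) * (Ln : Int) = 2 * (y : Int) := by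
    exact_mod_cast congrArg (fun z : Nat => (z : Int)) hy
  rw [hA, hB, pvFdiv_two, pvFdiv_two]
  have h2 := pvS_two Ln
  rw [hA, hB] at h2
  omega

-- ===== VERDICT (by name: the statement is the Claim_ definition above) =====
theorem count_feasible_solutions_spec : Claim_equal_count_feasible_solutions := by
  intro arr n _
  unfold Spec_count_feasible_solutions count_feasible_solutions count_feasible_solutions_alt
  by_cases h0 : n = 0
  · simp [h0]
  by_cases h123 : n = 1 ∨ n = 2 ∨ n = 3
  · simp [h0, h123]
  · simp only [if_neg h0, if_neg h123]
    rw [pvA_loop arr.length, pvB_val arr.length]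
    ring
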